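-- pv_equiv track=rewrite | github.com/strategypmo062/sns-report | src/preparse.py | _dcard_segments
-- ===== SOURCE A (Python) =====
-- def _dcard_segments(lines: list[str]) -> list[list[str]]:
--     """Split lines into non-empty segments separated by blank lines."""
--     segments: list[list[str]] = []
--     current: list[str] = []
--     for line in lines:
--         s = line.strip()
--         if not s:
--             if current:
--                 segments.append(current)
--                 current = []
--         else:
--             current.append(s)
--     if current:
--         segments.append(current)
--     return segments
-- ===== SOURCE B (Python) =====
-- def _dcard_segments(lines: list[str]) -> list[list[str]]:
--     """Split lines into non-empty segments separated by blank lines."""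
--     stripped = [line.strip() for line in lines]
--     segments: list[list[str]] = []
--     i = 0
--     n = len(stripped)
--     while i < n:
--         if not stripped[i]:
--             i += 1
--         else:
--             j = i
--             while j < n and stripped[j]:
--                 j += 1
--             segments.append(stripped[i:j])
--             i = j
--     return segments
-- ===== Notes on version B (the rewrite author's own statement) =====
-- stated objective: alternative
-- what changed: Replaced the current/flush accumulator state machine by a strip-once pass followed by a two-pointer scan that slices out each maximal run of non-blank lines directly.
import Mathlib
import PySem

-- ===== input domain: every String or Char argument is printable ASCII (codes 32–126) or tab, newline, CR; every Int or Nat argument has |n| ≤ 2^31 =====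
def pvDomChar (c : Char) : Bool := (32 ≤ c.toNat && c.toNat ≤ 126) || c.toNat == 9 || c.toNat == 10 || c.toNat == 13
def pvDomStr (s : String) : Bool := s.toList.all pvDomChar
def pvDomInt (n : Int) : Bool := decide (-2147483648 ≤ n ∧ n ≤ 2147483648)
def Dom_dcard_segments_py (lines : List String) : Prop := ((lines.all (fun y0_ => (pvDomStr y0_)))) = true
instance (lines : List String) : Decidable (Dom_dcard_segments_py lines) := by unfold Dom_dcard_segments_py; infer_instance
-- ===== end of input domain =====

-- B replaces A's current/flush accumulator state machine by stripping once and
-- slicing out each maximal run of non-blank lines with a two-pointer scan (alternative decomposition, same cost).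

-- ===== PORT A =====
-- the loop body of A, over (segments, current), applied to the stripped line
def dcardStepA (p : List (List String) × List String) (s : String) :
    List (List String) × List String :=
  if s = "" then
    if p.2 ≠ [] then (p.1 ++ [p.2], []) else p
  else
    (p.1, p.2 ++ [s])

def dcard_segments_py (lines : List String) : List (List String) :=
  let st := lines.foldl (fun p line => dcardStepA p (PySem.Str.strip line)) ([], [])
  if st.2 ≠ [] then st.1 ++ [st.2] else st.1

-- ===== PORT B =====
-- the two-pointer scan of B: skip blanks; at a non-blank, take the maximal
-- non-blank run (inner while loop / slice) and recurse after it
def dcardRuns : List String → List (List String)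
  | [] => []
  | s :: rest =>
    if s = "" then dcardRuns rest
    else ((s :: rest).takeWhile (· ≠ "")) :: dcardRuns ((s :: rest).dropWhile (· ≠ ""))
termination_by xs => xs.length
decreasing_by
  · simp
  · simp_all [List.dropWhile]
    exact List.length_dropWhile_le _ _

def dcard_segments_py_alt (lines : List String) : List (List String) :=
  dcardRuns (lines.map PySem.Str.strip)

-- ===== PRECONDITION & SPEC =====
def Spec_dcard_segments_py (lines : List String) (out : List (List String)) : Prop := out = dcard_segments_py_alt lines
instance (lines : List String) (out : List (List String)) : Decidable (Spec_dcard_segments_py lines out) := by unfold Spec_dcard_segments_py; infer_instance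

-- ===== CLAIM (what is proved, stated in full; the proofs are below) =====
def Claim_equal_dcard_segments_py : Prop := ∀ (lines : List String), Dom_dcard_segments_py lines → Spec_dcard_segments_py lines (dcard_segments_py lines)

-- ===== LEMMAS AND PROOFS =====

-- what A's loop computes from state (segs, cur): cur (if non-empty) prepended to the runs
lemma dcardRuns_inv :
    ∀ (xs : List String) (segs : List (List String)) (cur : List String),
      (let st := xs.foldl dcardStepA (segs, cur)
       if st.2 ≠ [] then st.1 ++ [st.2] else st.1) =
      segs ++ (if cur = [] then dcardRuns xs
               else (cur ++ xs.takeWhile (· ≠ "")) ::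
                    dcardRuns (xs.dropWhile (· ≠ ""))) := by
  intro xs
  induction xs with
  | nil =>
    intro segs cur
    by_cases h : cur = [] <;> simp [h, dcardRuns]
  | cons s rest ih =>
    intro segs cur
    by_cases hs : s = ""
    · by_cases hc : cur = []
      · simpa [hs, hc, dcardStepA, dcardRuns] using ih segs []
      · have := ih (segs ++ [cur]) []
        simp [hs, hc, dcardStepA, dcardRuns, List.takeWhile, List.dropWhile] at this ⊢
        simpa using this
    · have := ih segs (cur ++ [s])
      by_cases hc : cur = [] <;>
        simp [hs, hc, dcardStepA, dcardRuns, List.takeWhile, List.dropWhile] at this ⊢ <;>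
        simpa using this

-- ===== VERDICT (by name: the statement is the Claim_ definition above) =====
theorem dcard_segments_py_spec : Claim_equal_dcard_segments_py := by
  intro lines _
  unfold Spec_dcard_segments_py dcard_segments_py dcard_segments_py_alt
  rw [← List.foldl_map (f := PySem.Str.strip) (g := dcardStepA)]
  simpa using dcardRuns_inv (lines.map PySem.Str.strip) [] []
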